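-- pv_equiv track=rewrite | github.com/jupyter-naas/abi | libs/naas-abi/naas_abi/apps/nexus/apps/api/app/services/chat/service.py | _select_provider_model
-- ===== SOURCE A (Python) =====
-- from typing import Any
--
-- def _select_provider_model(ollama_status: dict[str, Any], has_images: bool) -> str:
--     preferred_models = (
--         [
--             "qwen3-vl:2b",
--             "qwen3-vl",
--             "qwen2.5vl:3b",
--             "qwen2.5vl",
--             "llava",
--             "moondream",
--             "gemma3",
--         ]
--         if has_images
--         else [
--             "qwen3-vl:2b",
--             "qwen2.5:3b",
--             "qwen2.5:1.5b",
--             "qwen2.5",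
--             "llama3.2:3b",
--             "llama3.2:1b",
--             "llama3.2",
--         ]
--     )
--     available = ollama_status["models"]
--     for pref in preferred_models:
--         for avail in available:
--             if pref in avail:
--                 return avail
--     return available[0]
-- ===== SOURCE B (Python) =====
-- def _select_provider_model(ollama_status, has_images):
--     preferred_models = (
--         [
--             "qwen3-vl:2b",
--             "qwen3-vl",
--             "qwen2.5vl:3b",
--             "qwen2.5vl",
--             "llava",
--             "moondream",
--             "gemma3",
--         ]
--         if has_images
--         else [
--             "qwen3-vl:2b",
--             "qwen2.5:3b",
--             "qwen2.5:1.5b",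
--             "qwen2.5",
--             "llama3.2:3b",
--             "llama3.2:1b",
--             "llama3.2",
--         ]
--     )
--     available = ollama_status["models"]
--     # staged passes: rank every model once, then return the first model with the
--     # minimal rank; unmatched models rank len(preferred_models), so the
--     # all-unmatched case yields available[0].
--     ranks = [
--         next((i for i, p in enumerate(preferred_models) if p in a),
--              len(preferred_models))
--         for a in available
--     ]
--     return available[ranks.index(min(ranks))]
-- ===== Notes on version B (the rewrite author's own statement) =====
-- stated objective: alternative
-- what changed: Replaces A's nested preferred-outer/available-inner scan with staged passes: map every available model to a preference rank, take min(ranks), and index the first model with that rank.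
import Mathlib
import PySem

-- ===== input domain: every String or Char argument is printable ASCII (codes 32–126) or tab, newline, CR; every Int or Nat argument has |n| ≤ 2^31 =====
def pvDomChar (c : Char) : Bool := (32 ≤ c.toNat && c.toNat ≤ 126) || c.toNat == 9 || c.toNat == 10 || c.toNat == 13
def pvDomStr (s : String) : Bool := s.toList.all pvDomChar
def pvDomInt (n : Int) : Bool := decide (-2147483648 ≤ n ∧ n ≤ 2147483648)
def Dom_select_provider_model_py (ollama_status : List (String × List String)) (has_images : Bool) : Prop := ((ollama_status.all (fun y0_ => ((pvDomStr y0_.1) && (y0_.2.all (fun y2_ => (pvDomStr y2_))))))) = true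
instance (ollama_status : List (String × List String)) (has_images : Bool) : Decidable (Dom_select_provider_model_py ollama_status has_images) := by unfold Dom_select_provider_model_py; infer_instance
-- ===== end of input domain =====

-- B replaces A's nested preferred-outer/available-inner scan by staged passes:
-- map each model to a preference rank, take min(ranks), and index the first
-- model carrying it (alternative decomposition; same asymptotic cost).

def pvPreferred (has_images : Bool) : List String :=
  if has_images then
    ["qwen3-vl:2b", "qwen3-vl", "qwen2.5vl:3b", "qwen2.5vl", "llava", "moondream", "gemma3"]
  else
    ["qwen3-vl:2b", "qwen2.5:3b", "qwen2.5:1.5b", "qwen2.5", "llama3.2:3b", "llama3.2:1b", "llama3.2"]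

-- ===== PORT A =====
-- the nested 'for pref in preferred: for avail in available: if pref in avail: return avail'
def pvLoopA (prefs : List String) (available : List String) : Option String :=
  match prefs with
  | [] => none
  | p :: ps =>
    match available.find? (fun a => PySem.Str.isIn p a) with
    | some a => some a
    | none => pvLoopA ps available

def select_provider_model_py (ollama_status : List (String × List String)) (has_images : Bool) : String :=
  let preferred_models := pvPreferred has_images
  -- ollama_status["models"]: KeyError (none) is excluded by Pre_; default [] is never used there
  let available := ((PySem.Dict.mk ollama_status).get? "models").getD []
  match pvLoopA preferred_models available with
  | some a => a
  -- return available[0]: IndexError (none) is excluded by Pre_; default "" is never used there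
  | none => (PySem.List.pyGet? available 0).getD ""

-- ===== PORT B =====
-- next((i for i, p in enumerate(preferred_models) if p in a), len(preferred_models))
def pvRank (prefs : List String) (a : String) : Nat :=
  match prefs with
  | [] => 0
  | p :: ps => if PySem.Str.isIn p a then 0 else pvRank ps a + 1

def select_provider_model_py_alt (ollama_status : List (String × List String)) (has_images : Bool) : String :=
  let preferred_models := pvPreferred has_images
  let available := ((PySem.Dict.mk ollama_status).get? "models").getD []
  -- ranks = [rank(a) for a in available]
  let ranks := available.map (fun a => pvRank preferred_models a)
  -- min(ranks): ValueError on an empty list, excluded by Pre_; "" never used there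
  match PySem.List.min? ranks (fun r => r) with
  | none => ""
  | some m =>
    -- available[ranks.index(m)]; m is a member of ranks, so index never raises
    match PySem.List.index? ranks m with
    | some i => (PySem.List.pyGet? available (i : Int)).getD ""
    | none => ""

-- ===== PRECONDITION & SPEC =====
-- Pre_ excludes exactly the inputs where A raises: a missing "models" key (KeyError) or an
-- empty model list (IndexError on available[0]).
def Pre_select_provider_model_py (ollama_status : List (String × List String)) (has_images : Bool) : Prop :=
  ((PySem.Dict.mk ollama_status).get? "models").getD [] ≠ []

instance (ollama_status : List (String × List String)) (has_images : Bool) : Decidable (Pre_select_provider_model_py ollama_status has_images) := by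
  unfold Pre_select_provider_model_py; infer_instance

def pvWitness_select_provider_model_py : (List (String × List String)) × Bool :=
  ([("models", ["llama3.2:1b", "phi3"])], false)

def Spec_select_provider_model_py (ollama_status : List (String × List String)) (has_images : Bool) (out : String) : Prop := out = select_provider_model_py_alt ollama_status has_images
instance (ollama_status : List (String × List String)) (has_images : Bool) (out : String) : Decidable (Spec_select_provider_model_py ollama_status has_images out) := by unfold Spec_select_provider_model_py; infer_instance

-- ===== CLAIM =====
def Claim_equal_select_provider_model_py : Prop := ∀ (ollama_status : List (String × List String)) (has_images : Bool), Dom_select_provider_model_py ollama_status has_images → Pre_select_provider_model_py ollama_status has_images → Spec_select_provider_model_py ollama_status has_images (select_provider_model_py ollama_status has_images)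

-- ===== LEMMAS AND PROOFS =====

-- first-minimum fold over a nonempty list, with the head as the running best
def pvArgm (f : String → Nat) (b : String) (l : List String) : String :=
  l.foldl (fun m a => if f a < f m then a else m) b

-- running minimum of f over x :: xs
def pvMin (f : String → Nat) (x : String) (xs : List String) : Nat :=
  (xs.map f).foldl min (f x)

theorem pvArgm_cons (f : String → Nat) (b a : String) (l : List String) :
    pvArgm f b (a :: l) = pvArgm f (if f a < f b then a else b) l := rfl

theorem pvFoldlMin (l : List Nat) : ∀ (u v : Nat),
    l.foldl min (min u v) = min u (l.foldl min v) := by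
  induction l with
  | nil => intro u v; rfl
  | cons c s ih =>
    intro u v
    simp only [List.foldl, Nat.min_assoc, ih]

theorem pvMin_cons (f : String → Nat) (x a : String) (t : List String) :
    pvMin f x (a :: t) = min (f x) (pvMin f a t) :=
  pvFoldlMin (t.map f) (f x) (f a)

theorem pvMin_le_mem (f : String → Nat) : ∀ (xs : List String) (x y : String),
    y ∈ x :: xs → pvMin f x xs ≤ f y := by
  intro xs
  induction xs with
  | nil =>
    intro x y hy
    rcases List.mem_singleton.mp hy with rfl
    exact le_of_eq rfl
  | cons a t ih =>
    intro x y hy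
    rw [pvMin_cons]
    rcases List.mem_cons.mp hy with rfl | hy'
    · exact min_le_left _ _
    · exact le_trans (min_le_right _ _) (ih a y hy')

theorem pvMin_mem (f : String → Nat) : ∀ (xs : List String) (x : String),
    pvMin f x xs ∈ (x :: xs).map f := by
  intro xs
  induction xs with
  | nil => intro x; simp [pvMin]
  | cons a t ih =>
    intro x
    rw [pvMin_cons, Nat.min_def]
    split_ifs with h
    · simp
    · have := ih a
      simp only [List.map, List.mem_cons] at this ⊢
      tauto

theorem pvArgm_head_le (f : String → Nat) : ∀ (xs : List String) (x : String),
    (∀ y ∈ xs, ¬ f y < f x) → pvArgm f x xs = x := by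
  intro xs
  induction xs with
  | nil => intro x _; rfl
  | cons a t ih =>
    intro x h
    rw [pvArgm_cons, if_neg (h a (by simp))]
    exact ih x (fun y hy => h y (List.mem_cons_of_mem a hy))

theorem pvArgm_head_drop (f : String → Nat) : ∀ (t : List String) (x a : String),
    pvMin f a t < f x → pvArgm f x (a :: t) = pvArgm f a t := by
  intro t
  induction t with
  | nil =>
    intro x a h
    simp only [pvMin, List.map, List.foldl] at h
    rw [pvArgm_cons, if_pos h]
  | cons c s ih =>
    intro x a h
    rw [pvMin_cons] at h
    by_cases hax : f a < f x
    · rw [pvArgm_cons, if_pos hax]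
    · have hcs : pvMin f c s < f x := by
        rcases min_lt_iff.mp h with h1 | h1
        · omega
        · exact h1
      have hca : pvMin f c s < f a := by
        rcases min_lt_iff.mp h with h1 | h1
        · omega
        · omega
      rw [pvArgm_cons, if_neg hax, ih x c hcs, ih a c hca]

-- B's staged computation on a nonempty available equals the first-minimum-by-rank pass
theorem pvB_eq_argm (f : String → Nat) : ∀ (xs : List String) (x : String),
    (match PySem.List.index? ((x :: xs).map f) (pvMin f x xs) with
     | some i => (PySem.List.pyGet? (x :: xs) (i : Int)).getD ""
     | none => "") = pvArgm f x xs := by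
  intro xs
  induction xs with
  | nil =>
    intro x
    simp [pvMin, pvArgm]
  | cons a t ih =>
    intro x
    by_cases hx : f x = pvMin f x (a :: t)
    · rw [List.map, ← hx, PySem.List.index?_cons_self]
      have hX : pvArgm f x (a :: t) = x :=
        pvArgm_head_le f (a :: t) x (fun y hy hlt => by
          have := pvMin_le_mem f (a :: t) x y (List.mem_cons_of_mem x hy)
          omega)
      simp [hX, PySem.List.pyGet?, PySem.List.pyIdx?, show (0:Int) ≤ (t.length:Int) + 1 by omega]
    · have hle : pvMin f x (a :: t) ≤ f x := pvMin_le_mem f (a :: t) x x (by simp)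
      have hlt : pvMin f x (a :: t) < f x := lt_of_le_of_ne hle (fun e => hx e.symm)
      have hmt : pvMin f x (a :: t) = pvMin f a t := by
        rw [pvMin_cons] at hlt ⊢
        rw [Nat.min_def] at hlt ⊢
        split_ifs at hlt ⊢ with h1
        · omega
        · rfl
      have hmem : pvMin f a t ∈ (a :: t).map f := pvMin_mem f t a
      have hs : (PySem.List.index? ((a :: t).map f) (pvMin f a t)).isSome :=
        (PySem.List.index?_isSome_iff _ _).mpr hmem
      rcases Option.isSome_iff_exists.mp hs with ⟨j, hj⟩
      rw [List.map, hmt, PySem.List.index?_cons_of_ne ((a :: t).map f) (fun e => hx (by rw [hmt]; exact e)), hj]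
      have hIH := ih a
      rw [hj] at hIH
      have hdrop := pvArgm_head_drop f t x a (by rw [← hmt]; exact hlt)
      rw [hdrop, ← hIH]
      simp only [Option.map_some, PySem.List.pyGet?_natCast]
      simp [List.getElem?_cons_succ]

-- ===== A-side lemmas (A's nested scan = first-minimum-by-rank) =====

theorem pvArgm_shift (f g : String → Nat) (x : String) (xs : List String)
    (h : ∀ y, y ∈ x :: xs → f y = g y + 1) : pvArgm f x xs = pvArgm g x xs := by
  induction xs generalizing x with
  | nil => rfl
  | cons a t ih =>
    have hfa := h a (by simp)
    have hfx := h x (by simp)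
    rw [pvArgm_cons, pvArgm_cons]
    by_cases hc : g a < g x
    · rw [if_pos (by omega : f a < f x), if_pos hc]
      exact ih a (fun y hy => h y (List.mem_cons_of_mem x hy))
    · rw [if_neg (by omega : ¬ f a < f x), if_neg hc]
      exact ih x (fun y hy => h y (by
        rcases List.mem_cons.mp hy with h1 | h2
        · simp [h1]
        · simp [h2]))

theorem pvArgm_zero_best (f : String → Nat) (x : String) (xs : List String)
    (hx : f x = 0) : pvArgm f x xs = x := by
  induction xs with
  | nil => rfl
  | cons a t ih =>
    rw [pvArgm_cons, if_neg (by omega : ¬ f a < f x)]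
    exact ih

theorem pvArgm_zero_find (f : String → Nat) (x : String) (xs : List String) (a : String)
    (hfind : xs.find? (fun y => f y == 0) = some a) (hx : f x ≠ 0) :
    pvArgm f x xs = a := by
  induction xs generalizing x with
  | nil => simp at hfind
  | cons r rs ih =>
    by_cases hr : f r = 0
    · have hra : r = a := by
        rw [List.find?_cons_of_pos (by simp [hr])] at hfind
        exact Option.some.inj hfind
      subst hra
      rw [pvArgm_cons, if_pos (by omega : f r < f x)]
      exact pvArgm_zero_best f r rs hr
    · rw [List.find?_cons_of_neg (by simp [hr])] at hfind
      rw [pvArgm_cons]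
      by_cases hc : f r < f x
      · rw [if_pos hc]; exact ih r hfind hr
      · rw [if_neg hc]; exact ih x hfind hx

theorem pvRank_cons_pred (p : String) (ps : List String) :
    (fun y => pvRank (p :: ps) y == 0) = (fun y => PySem.Str.isIn p y) := by
  funext y
  cases hb : PySem.Str.isIn p y with
  | true =>
    rw [show pvRank (p :: ps) y = 0 from by simp only [pvRank, if_pos hb]]
    rfl
  | false =>
    have hne : ¬ PySem.Str.isIn p y = true := fun hh => by
      rw [hb] at hh; exact Bool.false_ne_true hh
    rw [show pvRank (p :: ps) y = pvRank ps y + 1 from by simp only [pvRank, if_neg hne]]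
    simp

-- the core: A's nested scan over a nonempty available equals the first-minimum-by-rank pass
theorem pvLoopA_eq_argm (P : List String) (x : String) (xs : List String) :
    (match pvLoopA P (x :: xs) with
     | some a => a
     | none => x) = pvArgm (pvRank P) x xs := by
  induction P with
  | nil =>
    rw [pvArgm_zero_best (pvRank []) x xs rfl]
    rfl
  | cons p ps ih =>
    by_cases hx : PySem.Str.isIn p x = true
    · have hr : pvRank (p :: ps) x = 0 := by simp only [pvRank, if_pos hx]
      rw [pvArgm_zero_best _ x xs hr]
      simp only [pvLoopA, List.find?_cons_of_pos (show (fun a => PySem.Str.isIn p a) x = true from hx)]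
    · have hx0 : pvRank (p :: ps) x ≠ 0 := by simp only [pvRank, if_neg hx]; omega
      cases hfind : xs.find? (fun a => PySem.Str.isIn p a) with
      | some a =>
        have hfind' : xs.find? (fun y => pvRank (p :: ps) y == 0) = some a := by
          rw [pvRank_cons_pred]; exact hfind
        rw [pvArgm_zero_find (pvRank (p :: ps)) x xs a hfind' hx0]
        simp only [pvLoopA,
          List.find?_cons_of_neg (show ¬ (fun a => PySem.Str.isIn p a) x = true from hx), hfind]
      | none =>
        have hall : ∀ y, y ∈ x :: xs → pvRank (p :: ps) y = pvRank ps y + 1 := by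
          intro y hy
          rcases List.mem_cons.mp hy with h1 | h2
          · subst h1; simp only [pvRank, if_neg hx]
          · have hny := List.find?_eq_none.mp hfind y h2
            simp only [pvRank, if_neg hny]
        rw [pvArgm_shift _ (pvRank ps) x xs hall, ← ih]
        simp only [pvLoopA,
          List.find?_cons_of_neg (show ¬ (fun a => PySem.Str.isIn p a) x = true from hx), hfind]

-- ===== VERDICT =====
theorem select_provider_model_py_spec : Claim_equal_select_provider_model_py := by
  intro ollama_status has_images _ hpre
  unfold Spec_select_provider_model_py select_provider_model_py select_provider_model_py_alt
  unfold Pre_select_provider_model_py at hpre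
  cases hget : (PySem.Dict.mk ollama_status).get? "models" with
  | none => rw [hget] at hpre; exact absurd rfl hpre
  | some l =>
    rw [hget] at hpre
    cases l with
    | nil => exact absurd rfl hpre
    | cons x xs =>
      simp only [Option.getD_some]
      have hA := pvLoopA_eq_argm (pvPreferred has_images) x xs
      have hB := pvB_eq_argm (fun a => pvRank (pvPreferred has_images) a) xs x
      have hA' : (match pvLoopA (pvPreferred has_images) (x :: xs) with
          | some a => a
          | none => (PySem.List.pyGet? (x :: xs) 0).getD "") = pvArgm (pvRank (pvPreferred has_images)) x xs := by
        rw [← hA]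
        cases pvLoopA (pvPreferred has_images) (x :: xs) <;> simp [PySem.List.pyGet?, PySem.List.pyIdx?]
      refine hA'.trans ?_
      simp only [List.map_cons]
      rw [PySem.List.min?_id_cons]
      exact hB.symm
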